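-- pv_equiv track=rewrite | github.com/AlifSrSE/ProblemSolves | 1843B-longLong.py | max_sum_and_min_operations
-- ===== SOURCE A (Python) =====
-- def max_sum_and_min_operations(n, array):
--     max_sum = sum(abs(x) for x in array)
--     min_operations = 0
--     i = 0
--
--     while i < n:
--         if array[i] < 0:
--             min_operations += 1
--             while i < n and array[i] < 0:
--                 i += 1
--         while i < n and array[i] >= 0:
--             i += 1
--
--     return max_sum, min_operations
-- ===== SOURCE B (Python) =====
-- def max_sum_and_min_operations(n, array):
--     prefix = array[:n] if n >= 0 else []
--
--     def blocks(lo, hi):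
--         # number of maximal runs of negatives in prefix[lo:hi]
--         if hi - lo <= 1:
--             return 1 if lo < hi and prefix[lo] < 0 else 0
--         mid = (lo + hi) // 2
--         joined = 1 if prefix[mid - 1] < 0 and prefix[mid] < 0 else 0
--         return blocks(lo, mid) + blocks(mid, hi) - joined
--
--     return sum(abs(x) for x in array), blocks(0, len(prefix))
-- ===== Notes on version B (the rewrite author's own statement) =====
-- stated objective: alternative
-- what changed: min_operations is computed by divide-and-conquer instead of a left-to-right run-skipping scan: blocks(lo,hi) splits the prefix at mid and combines blocks(lo,mid)+blocks(mid,hi) minus 1 when a negative run crosses the midpoint.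
import Mathlib
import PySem

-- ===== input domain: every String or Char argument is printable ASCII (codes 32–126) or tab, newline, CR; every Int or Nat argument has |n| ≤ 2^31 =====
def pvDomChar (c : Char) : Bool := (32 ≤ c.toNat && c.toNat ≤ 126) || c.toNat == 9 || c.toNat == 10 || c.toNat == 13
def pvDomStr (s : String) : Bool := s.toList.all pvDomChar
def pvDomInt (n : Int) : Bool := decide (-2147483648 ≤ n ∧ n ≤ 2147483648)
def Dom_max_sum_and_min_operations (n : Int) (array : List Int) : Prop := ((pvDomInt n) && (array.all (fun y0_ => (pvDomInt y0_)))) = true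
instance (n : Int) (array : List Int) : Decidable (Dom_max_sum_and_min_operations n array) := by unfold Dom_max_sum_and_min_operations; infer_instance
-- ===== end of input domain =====

-- B replaces A's run-skipping while-loops by divide-and-conquer on the prefix (blocks(lo,hi)=blocks(lo,mid)+blocks(mid,hi)-crossing); equal wherever A returns (n ≤ len(array)).

-- ===== PORT A =====
-- abs(x) ported by hand (exact for Int): if x < 0 then -x else x
def pvAbs (x : Int) : Int := if x < 0 then -x else x

-- inner `while i < n and array[i] < 0: i += 1`; fuel = (n - i).toNat bounds the iterations, it never cuts the loop short
def pvSkipNeg (n : Int) (a : List Int) : Nat → Int → Int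
  | 0, i => i
  | fuel + 1, i =>
      if i < n ∧ PySem.List.pyGetD a i 0 < 0 then pvSkipNeg n a fuel (i + 1) else i

-- inner `while i < n and array[i] >= 0: i += 1`
def pvSkipNonneg (n : Int) (a : List Int) : Nat → Int → Int
  | 0, i => i
  | fuel + 1, i =>
      if i < n ∧ 0 ≤ PySem.List.pyGetD a i 0 then pvSkipNonneg n a fuel (i + 1) else i

-- the outer `while i < n:` loop; i advances by ≥ 1 per iteration, so fuel = n.toNat suffices
def pvLoopA (n : Int) (a : List Int) : Nat → Int → Int → Int
  | 0, _, ops => ops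
  | fuel + 1, i, ops =>
      if i < n then
        if PySem.List.pyGetD a i 0 < 0 then
          let k := pvSkipNeg n a (n - i).toNat i
          pvLoopA n a fuel (pvSkipNonneg n a (n - k).toNat k) (ops + 1)
        else
          pvLoopA n a fuel (pvSkipNonneg n a (n - i).toNat i) ops
      else ops

def max_sum_and_min_operations (n : Int) (array : List Int) : Int × Int :=
  let max_sum := array.foldl (fun s x => s + pvAbs x) 0
  (max_sum, pvLoopA n array n.toNat 0 0)

-- ===== PORT B =====
-- `blocks(lo, hi)`: number of maximal negative runs in prefix[lo:hi], by divide and conquer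
def pvBlocks (p : List Int) (lo hi : Int) : Int :=
  if hi - lo ≤ 1 then
    (if lo < hi ∧ PySem.List.pyGetD p lo 0 < 0 then 1 else 0)
  else
    let mid := PySem.Int.floordiv (lo + hi) 2
    let joined := if PySem.List.pyGetD p (mid - 1) 0 < 0 ∧ PySem.List.pyGetD p mid 0 < 0 then 1 else 0
    pvBlocks p lo mid + pvBlocks p mid hi - joined
termination_by (hi - lo).toNat
decreasing_by
  all_goals
    rw [PySem.Int.floordiv_eq_ediv_of_pos (by omega : (0:Int) < 2)] at *
    omega

def max_sum_and_min_operations_alt (n : Int) (array : List Int) : Int × Int :=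
  let pfx := if 0 ≤ n then PySem.List.slice array none (some n) else []
  (array.foldl (fun s x => s + pvAbs x) 0, pvBlocks pfx 0 (pfx.length : Int))

-- ===== PRECONDITION & SPEC =====
-- A raises IndexError when n > len(array) (its scan indexes array[i] for i up to n-1); Pre_ excludes exactly those inputs.
def Pre_max_sum_and_min_operations (n : Int) (array : List Int) : Prop := n ≤ (array.length : Int)
instance (n : Int) (array : List Int) : Decidable (Pre_max_sum_and_min_operations n array) := by
  unfold Pre_max_sum_and_min_operations; infer_instance

def pvWitness_max_sum_and_min_operations : Int × List Int := (4, [1, -2, -3, 4])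

def Spec_max_sum_and_min_operations (n : Int) (array : List Int) (out : Int × Int) : Prop := out = max_sum_and_min_operations_alt n array
instance (n : Int) (array : List Int) (out : Int × Int) : Decidable (Spec_max_sum_and_min_operations n array out) := by unfold Spec_max_sum_and_min_operations; infer_instance

-- ===== CLAIM (what is proved, stated in full; the proofs are below) =====
def Claim_equal_max_sum_and_min_operations : Prop := ∀ (n : Int) (array : List Int), Dom_max_sum_and_min_operations n array → Pre_max_sum_and_min_operations n array → Spec_max_sum_and_min_operations n array (max_sum_and_min_operations n array)

-- ===== LEMMAS AND PROOFS =====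

-- count of negative-block starts at positions i..hi-1, relative to a segment beginning at lo (proof-side only)
def pvS (p : List Int) (lo hi i : Int) : Int :=
  if h : i < hi then
    (if PySem.List.pyGetD p i 0 < 0 ∧ (i = lo ∨ 0 ≤ PySem.List.pyGetD p (i - 1) 0) then 1 else 0)
      + pvS p lo hi (i + 1)
  else 0
termination_by (hi - i).toNat
decreasing_by omega

lemma pvS_zero (p : List Int) (lo hi i : Int) (h : ¬ i < hi) : pvS p lo hi i = 0 := by
  rw [pvS]; exact dif_neg h

lemma pvS_succ (p : List Int) (lo hi i : Int) (h : i < hi) :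
    pvS p lo hi i =
      (if PySem.List.pyGetD p i 0 < 0 ∧ (i = lo ∨ 0 ≤ PySem.List.pyGetD p (i - 1) 0) then 1 else 0)
        + pvS p lo hi (i + 1) := by
  conv_lhs => rw [pvS]
  rw [dif_pos h]

lemma pvSkipNeg_ge (n : Int) (a : List Int) :
    ∀ fuel : Nat, ∀ i : Int, i ≤ pvSkipNeg n a fuel i := by
  intro fuel
  induction fuel with
  | zero => intro i; simp [pvSkipNeg]
  | succ f ih =>
      intro i
      rw [pvSkipNeg]
      split_ifs with h
      · have := ih (i + 1); omega
      · omega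

lemma pvSkipNonneg_ge (n : Int) (a : List Int) :
    ∀ fuel : Nat, ∀ i : Int, i ≤ pvSkipNonneg n a fuel i := by
  intro fuel
  induction fuel with
  | zero => intro i; simp [pvSkipNonneg]
  | succ f ih =>
      intro i
      rw [pvSkipNonneg]
      split_ifs with h
      · have := ih (i + 1); omega
      · omega

lemma pvSkipNeg_stop (n : Int) (a : List Int) :
    ∀ fuel : Nat, ∀ i : Int, (n - i).toNat ≤ fuel →
      ¬ (pvSkipNeg n a fuel i < n ∧ PySem.List.pyGetD a (pvSkipNeg n a fuel i) 0 < 0) := by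
  intro fuel
  induction fuel with
  | zero => intro i hf; simp only [pvSkipNeg]; omega
  | succ f ih =>
      intro i hf
      rw [pvSkipNeg]
      split_ifs with h
      · exact ih (i + 1) (by omega)
      · exact h

lemma pvSkipNonneg_stop (n : Int) (a : List Int) :
    ∀ fuel : Nat, ∀ i : Int, (n - i).toNat ≤ fuel →
      ¬ (pvSkipNonneg n a fuel i < n ∧ 0 ≤ PySem.List.pyGetD a (pvSkipNonneg n a fuel i) 0) := by
  intro fuel
  induction fuel with
  | zero => intro i hf; simp only [pvSkipNonneg]; omega
  | succ f ih =>
      intro i hf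
      rw [pvSkipNonneg]
      split_ifs with h
      · exact ih (i + 1) (by omega)
      · exact h

lemma pvSkipNeg_all (n : Int) (a : List Int) :
    ∀ fuel : Nat, ∀ i j : Int, i ≤ j → j < pvSkipNeg n a fuel i →
      (j < n ∧ PySem.List.pyGetD a j 0 < 0) := by
  intro fuel
  induction fuel with
  | zero => intro i j h1 h2; simp only [pvSkipNeg] at h2; omega
  | succ f ih =>
      intro i j h1 h2
      rw [pvSkipNeg] at h2
      split_ifs at h2 with h
      · rcases eq_or_lt_of_le h1 with rfl | hlt
        · exact h
        · exact ih (i + 1) j (by omega) h2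
      · omega

lemma pvSkipNonneg_all (n : Int) (a : List Int) :
    ∀ fuel : Nat, ∀ i j : Int, i ≤ j → j < pvSkipNonneg n a fuel i →
      (j < n ∧ 0 ≤ PySem.List.pyGetD a j 0) := by
  intro fuel
  induction fuel with
  | zero => intro i j h1 h2; simp only [pvSkipNonneg] at h2; omega
  | succ f ih =>
      intro i j h1 h2
      rw [pvSkipNonneg] at h2
      split_ifs at h2 with h
      · rcases eq_or_lt_of_le h1 with rfl | hlt
        · exact h
        · exact ih (i + 1) j (by omega) h2
      · omega

lemma pvSkipNeg_gt (n : Int) (a : List Int) (fuel : Nat) (i : Int) (h1 : i < n)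
    (h2 : PySem.List.pyGetD a i 0 < 0) (hf : 0 < fuel) :
    i + 1 ≤ pvSkipNeg n a fuel i := by
  obtain ⟨f, rfl⟩ : ∃ f, fuel = f + 1 := ⟨fuel - 1, by omega⟩
  rw [pvSkipNeg, if_pos ⟨h1, h2⟩]
  exact pvSkipNeg_ge n a f (i + 1)

lemma pvSkipNonneg_gt (n : Int) (a : List Int) (fuel : Nat) (i : Int) (h1 : i < n)
    (h2 : 0 ≤ PySem.List.pyGetD a i 0) (hf : 0 < fuel) :
    i + 1 ≤ pvSkipNonneg n a fuel i := by
  obtain ⟨f, rfl⟩ : ∃ f, fuel = f + 1 := ⟨fuel - 1, by omega⟩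
  rw [pvSkipNonneg, if_pos ⟨h1, h2⟩]
  exact pvSkipNonneg_ge n a f (i + 1)

-- pvS (for lo = 0, counting over the full array a with bound n) is unchanged across a stretch with no block start
lemma pvS_ext (a : List Int) (n : Int) :
    ∀ m : Nat, ∀ i i' : Int, (i' - i).toNat ≤ m → i ≤ i' →
      (∀ j, i ≤ j → j < i' →
        ¬ (PySem.List.pyGetD a j 0 < 0 ∧ (j = 0 ∨ 0 ≤ PySem.List.pyGetD a (j - 1) 0))) →
      pvS a 0 n i = pvS a 0 n i' := by
  intro m
  induction m with
  | zero =>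
      intro i i' hm hle _
      rcases eq_or_lt_of_le hle with rfl | h
      · rfl
      · omega
  | succ m ih =>
      intro i i' hm hle hno
      rcases eq_or_lt_of_le hle with rfl | hlt
      · rfl
      · rw [pvS]
        by_cases hin : i < n
        · rw [dif_pos hin, if_neg (hno i le_rfl hlt), zero_add]
          exact ih (i + 1) i' (by omega) (by omega) (fun j h1 h2 => hno j (by omega) h2)
        · rw [dif_neg hin, pvS, dif_neg (by omega : ¬ i' < n)]

-- the main invariant: A's outer loop computes ops + (number of block starts in [i, n)),
-- at every state where i = 0, i ≥ n, or a[i-1] ≥ 0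
lemma pvLoopA_cnt (n : Int) (a : List Int) :
    ∀ fuel : Nat, ∀ i ops : Int, (n - i).toNat ≤ fuel → 0 ≤ i →
      (i = 0 ∨ n ≤ i ∨ 0 ≤ PySem.List.pyGetD a (i - 1) 0) →
      pvLoopA n a fuel i ops = ops + pvS a 0 n i := by
  intro fuel
  induction fuel with
  | zero =>
      intro i ops hm h0 _
      rw [pvLoopA, pvS, dif_neg (by omega : ¬ i < n)]
      omega
  | succ fuel ih =>
      intro i ops hm h0 hinv
      by_cases hin : i < n
      · rw [pvLoopA]
        rw [if_pos hin]
        by_cases hneg : PySem.List.pyGetD a i 0 < 0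
        · rw [if_pos hneg]
          set k := pvSkipNeg n a (n - i).toNat i with hk
          set m2 := pvSkipNonneg n a (n - k).toNat k with hm2
          have hki : i + 1 ≤ k := pvSkipNeg_gt n a ((n - i).toNat) i hin hneg (by omega)
          have hm2k : k ≤ m2 := pvSkipNonneg_ge n a ((n - k).toNat) k
          have hstart : PySem.List.pyGetD a i 0 < 0 ∧
              (i = 0 ∨ 0 ≤ PySem.List.pyGetD a (i - 1) 0) := by
            refine ⟨hneg, ?_⟩; rcases hinv with h | h | h
            · exact Or.inl h
            · omega
            · exact Or.inr h
          -- no start in [i+1, m2)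
          have hno : ∀ j, i + 1 ≤ j → j < m2 →
              ¬ (PySem.List.pyGetD a j 0 < 0 ∧
                 (j = 0 ∨ 0 ≤ PySem.List.pyGetD a (j - 1) 0)) := by
            intro j hj1 hj2 hjs
            obtain ⟨hjneg, hjst⟩ := hjs
            by_cases hjk : j < k
            · have := pvSkipNeg_all n a ((n - i).toNat) i (j - 1) (by omega) (by omega)
              rcases hjst with h | h
              · omega
              · omega
            · have := pvSkipNonneg_all n a ((n - k).toNat) k j (by omega) hj2
              omega
          have hc1 : pvS a 0 n i = 1 + pvS a 0 n (i + 1) := by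
            rw [pvS, dif_pos hin, if_pos hstart]
          have hc2 : pvS a 0 n (i + 1) = pvS a 0 n m2 :=
            pvS_ext a n (m2 - (i + 1)).toNat (i + 1) m2 le_rfl (by omega) hno
          have hinv2 : m2 = 0 ∨ n ≤ m2 ∨ 0 ≤ PySem.List.pyGetD a (m2 - 1) 0 := by
            by_cases hm2n : m2 < n
            · rcases eq_or_lt_of_le hm2k with heq | hlt
              · exfalso
                have hs1 := pvSkipNeg_stop n a (n - i).toNat i le_rfl
                have hs2 := pvSkipNonneg_stop n a (n - k).toNat k le_rfl
                rw [← hk, heq] at hs1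
                rw [← hm2] at hs2
                rw [not_and_or] at hs1 hs2
                rcases hs1 with h | h <;> rcases hs2 with h' | h' <;> omega
              · have := pvSkipNonneg_all n a ((n - k).toNat) k (m2 - 1) (by omega) (by omega)
                exact Or.inr (Or.inr this.2)
            · exact Or.inr (Or.inl (by omega))
          rw [ih m2 (ops + 1) (by omega) (by omega) hinv2, hc1, hc2]
          ring
        · rw [if_neg hneg]
          set m1 := pvSkipNonneg n a (n - i).toNat i with hm1
          have hm1i : i + 1 ≤ m1 := pvSkipNonneg_gt n a ((n - i).toNat) i hin (by omega) (by omega)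
          have hno : ∀ j, i ≤ j → j < m1 →
              ¬ (PySem.List.pyGetD a j 0 < 0 ∧
                 (j = 0 ∨ 0 ≤ PySem.List.pyGetD a (j - 1) 0)) := by
            intro j hj1 hj2 hjs
            obtain ⟨hjneg, _⟩ := hjs
            have := pvSkipNonneg_all n a ((n - i).toNat) i j hj1 hj2
            omega
          have hc : pvS a 0 n i = pvS a 0 n m1 :=
            pvS_ext a n (m1 - i).toNat i m1 le_rfl (by omega) hno
          have hinv1 : m1 = 0 ∨ n ≤ m1 ∨ 0 ≤ PySem.List.pyGetD a (m1 - 1) 0 := by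
            by_cases hm1n : m1 < n
            · have := pvSkipNonneg_all n a ((n - i).toNat) i (m1 - 1) (by omega) (by omega)
              exact Or.inr (Or.inr this.2)
            · exact Or.inr (Or.inl (by omega))
          rw [ih m1 ops (by omega) (by omega) hinv1, hc]
      · rw [pvLoopA, if_neg hin, pvS, dif_neg hin]
        omega

-- pvS splits at any midpoint: count over [i, hi) = count over [i, mid) + count over [mid, hi)
lemma pvS_concat (p : List Int) (lo hi : Int) :
    ∀ m : Nat, ∀ mid i : Int, (mid - i).toNat ≤ m → i ≤ mid → mid ≤ hi →
      pvS p lo hi i = pvS p lo mid i + pvS p lo hi mid := by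
  intro m
  induction m with
  | zero =>
      intro mid i hm h1 h2
      have : i = mid := by omega
      subst this
      rw [pvS_zero p lo i i (by omega)]
      ring
  | succ m ih =>
      intro mid i hm h1 h2
      rcases eq_or_lt_of_le h1 with rfl | hlt
      · rw [pvS_zero p lo i i (by omega)]; ring
      · rw [pvS_succ p lo hi i (by omega), pvS_succ p lo mid i hlt,
          ih mid (i + 1) (by omega) (by omega) h2]
        ring

-- the lo parameter is irrelevant at positions strictly above both los
lemma pvS_lo_irrel (p : List Int) (hi : Int) :
    ∀ m : Nat, ∀ lo lo' i : Int, (hi - i).toNat ≤ m → lo < i → lo' < i →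
      pvS p lo hi i = pvS p lo' hi i := by
  intro m
  induction m with
  | zero =>
      intro lo lo' i hm h1 h2
      rw [pvS_zero p lo hi i (by omega), pvS_zero p lo' hi i (by omega)]
  | succ m ih =>
      intro lo lo' i hm h1 h2
      by_cases hin : i < hi
      · rw [pvS_succ p lo hi i hin, pvS_succ p lo' hi i hin,
          ih lo lo' (i + 1) (by omega) (by omega) (by omega)]
        congr 1
        have : (i = lo ∨ 0 ≤ PySem.List.pyGetD p (i - 1) 0) ↔
               (i = lo' ∨ 0 ≤ PySem.List.pyGetD p (i - 1) 0) := by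
          constructor
          · rintro (h | h)
            · omega
            · exact Or.inr h
          · rintro (h | h)
            · omega
            · exact Or.inr h
        simp only [this]
      · rw [pvS_zero p lo hi i hin, pvS_zero p lo' hi i hin]

-- restarting the count at mid adds exactly 1 when a negative run crosses mid
lemma pvS_head_shift (p : List Int) (lo mid hi : Int) (h1 : lo < mid) (h2 : mid < hi) :
    pvS p mid hi mid = pvS p lo hi mid +
      (if PySem.List.pyGetD p (mid - 1) 0 < 0 ∧ PySem.List.pyGetD p mid 0 < 0 then 1 else 0) := by
  rw [pvS_succ p mid hi mid h2, pvS_succ p lo hi mid h2,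
    pvS_lo_irrel p hi (hi - (mid + 1)).toNat mid lo (mid + 1) le_rfl (by omega) (by omega)]
  by_cases ha : PySem.List.pyGetD p mid 0 < 0
  · by_cases hb : 0 ≤ PySem.List.pyGetD p (mid - 1) 0
    · rw [if_pos ⟨ha, Or.inl rfl⟩, if_pos ⟨ha, Or.inr hb⟩, if_neg (by omega)]
      ring
    · rw [if_pos ⟨ha, Or.inl rfl⟩, if_neg (by rintro ⟨-, (h | h)⟩ <;> omega),
        if_pos ⟨by omega, ha⟩]
      ring
  · rw [if_neg (by rintro ⟨h, -⟩; omega), if_neg (by rintro ⟨h, -⟩; omega),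
      if_neg (by rintro ⟨-, h⟩; omega)]
    ring

-- B's divide and conquer computes the block-start count relative to lo
lemma pvBlocks_eq_pvS (p : List Int) :
    ∀ m : Nat, ∀ lo hi : Int, (hi - lo).toNat ≤ m →
      pvBlocks p lo hi = pvS p lo hi lo := by
  intro m
  induction m with
  | zero =>
      intro lo hi hm
      rw [pvBlocks, if_pos (by omega), pvS_zero p lo hi lo (by omega),
        if_neg (by rintro ⟨h', -⟩; omega)]
  | succ m ih =>
      intro lo hi hm
      by_cases hsmall : hi - lo ≤ 1
      · rw [pvBlocks, if_pos hsmall]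
        by_cases h : lo < hi
        · rw [pvS_succ p lo hi lo h, pvS_zero p lo hi (lo + 1) (by omega), add_zero]
          by_cases hneg : PySem.List.pyGetD p lo 0 < 0
          · rw [if_pos ⟨h, hneg⟩, if_pos ⟨hneg, Or.inl rfl⟩]
          · rw [if_neg (by rintro ⟨-, h'⟩; omega), if_neg (by rintro ⟨h', -⟩; omega)]
        · rw [pvS_zero p lo hi lo h, if_neg (by rintro ⟨h', -⟩; omega)]
      · rw [pvBlocks, if_neg hsmall]
        have hmid : lo < PySem.Int.floordiv (lo + hi) 2 ∧ PySem.Int.floordiv (lo + hi) 2 < hi := by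
          rw [PySem.Int.floordiv_eq_ediv_of_pos (by omega : (0:Int) < 2)]
          omega
        set mid := PySem.Int.floordiv (lo + hi) 2 with hmiddef
        simp only
        rw [ih lo mid (by omega), ih mid hi (by omega),
          pvS_head_shift p lo mid hi hmid.1 hmid.2,
          pvS_concat p lo hi (mid - lo).toNat mid lo le_rfl (by omega) (by omega)]
        ring

-- pyGetD through take: below the cut the prefix and the array agree
lemma pvGetD_take (a : List Int) (k : Nat) (j : Int) (h0 : 0 ≤ j) (hj : j < (k : Int)) :
    PySem.List.pyGetD (a.take k) j 0 = PySem.List.pyGetD a j 0 := by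
  have hjk : j.toNat < k := by omega
  simp only [PySem.List.pyGetD_of_nonneg _ _ h0]
  rw [List.getD, List.getD, List.getElem?_take]
  simp [hjk]

-- counting over the prefix equals counting over the array below n
lemma pvS_take (a : List Int) (n : Int) (hn : 0 ≤ n) :
    ∀ m : Nat, ∀ i : Int, (n - i).toNat ≤ m → 0 ≤ i →
      pvS (a.take n.toNat) 0 n i = pvS a 0 n i := by
  intro m
  induction m with
  | zero =>
      intro i hm h0
      rw [pvS_zero _ 0 n i (by omega), pvS_zero a 0 n i (by omega)]
  | succ m ih =>
      intro i hm h0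
      by_cases hin : i < n
      · rw [pvS_succ _ 0 n i hin, pvS_succ a 0 n i hin, ih (i + 1) (by omega) (by omega)]
        congr 1
        have hgi : PySem.List.pyGetD (a.take n.toNat) i 0 = PySem.List.pyGetD a i 0 :=
          pvGetD_take a n.toNat i h0 (by omega)
        by_cases hz : i = 0
        · subst hz
          simp [hgi]
        · have hgp : PySem.List.pyGetD (a.take n.toNat) (i - 1) 0 =
              PySem.List.pyGetD a (i - 1) 0 :=
            pvGetD_take a n.toNat (i - 1) (by omega) (by omega)
          simp only [hgi, hgp]
      · rw [pvS_zero _ 0 n i hin, pvS_zero a 0 n i hin]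

-- ===== VERDICT (by name: the statement is the Claim_ definition above) =====
theorem max_sum_and_min_operations_spec : Claim_equal_max_sum_and_min_operations := by
  intro n array _ hpre
  have hlen0 : n ≤ (array.length : Int) := hpre
  unfold Spec_max_sum_and_min_operations max_sum_and_min_operations max_sum_and_min_operations_alt
  simp only
  rw [Prod.mk.injEq]
  refine ⟨rfl, ?_⟩
  rw [pvLoopA_cnt n array n.toNat 0 0 (by omega) le_rfl (Or.inl rfl), zero_add]
  by_cases hn : 0 ≤ n
  · rw [if_pos hn, PySem.List.slice_to array hn]
    have hlen : (((array.take n.toNat).length : Nat) : Int) = n := by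
      simp [List.length_take]
      omega
    rw [hlen, pvBlocks_eq_pvS (array.take n.toNat) (n - 0).toNat 0 n (by omega),
      pvS_take array n hn (n - 0).toNat 0 le_rfl le_rfl]
  · rw [if_neg hn]
    simp only [List.length_nil, Int.ofNat_zero]
    rw [pvBlocks, if_pos (by norm_num), if_neg (by rintro ⟨h, -⟩; omega)]
    exact pvS_zero array 0 n 0 (by omega)
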